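-- pv_equiv track=rewrite | github.com/rolysr/daa-team | Problema1/Soluciones/greedy_bs.py | solve
-- ===== SOURCE A (Python) =====
-- def solve(a, b, n, hi_sum, c, e, m, height):
--     """Binary Search Solve"""
--     if a==b:
--         count_ups = (a)*height - (hi_sum[a-1]) if a > 0 else 0
--         count_downs = (hi_sum[n-1] - hi_sum[a-1]) - (n-a)*height if a > 0 else  hi_sum[n-1] - (n-a)*height
--         result = 0
--
--         if count_ups == count_downs and m <= c + e:
--             result = count_ups*m
--
--         elif count_ups < count_downs and m <= c + e:
--             result = count_ups*m + (count_downs - count_ups)*e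
--
--         elif count_ups > count_downs and m <= c + e:
--             result = count_downs*m + (count_ups - count_downs)*c
--
--         else:
--             result = count_ups*c + count_downs*e
--
--         return result
--
--
--     mid = int((a+b)/2)
--     current_height = hi_sum[mid] - hi_sum[mid-1] if mid > 0 else hi_sum[mid]
--
--     if current_height < height:
--         return solve(mid + 1, b, n, hi_sum, c, e, m, height)
--
--     else:
--         return solve(a, mid, n, hi_sum, c, e, m, height)
-- ===== SOURCE B (Python) =====
-- def solve(a, b, n, hi_sum, c, e, m, height):
--     """Iterative binary search over the shrinking window [a, b], then one
--     merged cost computation at the settled threshold index."""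
--     while a != b:
--         mid = (a + b) // 2
--         cur = hi_sum[mid] - (hi_sum[mid - 1] if mid > 0 else 0)
--         if cur < height:
--             a = mid + 1
--         else:
--             b = mid
--     if a > 0:
--         pref = hi_sum[a - 1]
--         ups = a * height - pref
--     else:
--         pref = 0
--         ups = 0
--     downs = (hi_sum[n - 1] - pref) - (n - a) * height
--     if m <= c + e:
--         if ups <= downs:
--             return ups * m + (downs - ups) * e
--         return downs * m + (ups - downs) * c
--     return ups * c + downs * e
-- ===== Notes on version B (the rewrite author's own statement) =====
-- stated objective: alternative
-- what changed: The tail recursion becomes an iterative while-loop binary search over the shrinking window [a,b], and the four-branch cost block at the threshold is replaced by a single prefix value plus a merged three-way arithmetic.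
-- outside the precondition, e.g. on solve(-2, 4, 4, [-33, -2, 0, 185, 3, 4], 6, 71, -2, -1): A returns 13355, B returns 13561
import Mathlib
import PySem

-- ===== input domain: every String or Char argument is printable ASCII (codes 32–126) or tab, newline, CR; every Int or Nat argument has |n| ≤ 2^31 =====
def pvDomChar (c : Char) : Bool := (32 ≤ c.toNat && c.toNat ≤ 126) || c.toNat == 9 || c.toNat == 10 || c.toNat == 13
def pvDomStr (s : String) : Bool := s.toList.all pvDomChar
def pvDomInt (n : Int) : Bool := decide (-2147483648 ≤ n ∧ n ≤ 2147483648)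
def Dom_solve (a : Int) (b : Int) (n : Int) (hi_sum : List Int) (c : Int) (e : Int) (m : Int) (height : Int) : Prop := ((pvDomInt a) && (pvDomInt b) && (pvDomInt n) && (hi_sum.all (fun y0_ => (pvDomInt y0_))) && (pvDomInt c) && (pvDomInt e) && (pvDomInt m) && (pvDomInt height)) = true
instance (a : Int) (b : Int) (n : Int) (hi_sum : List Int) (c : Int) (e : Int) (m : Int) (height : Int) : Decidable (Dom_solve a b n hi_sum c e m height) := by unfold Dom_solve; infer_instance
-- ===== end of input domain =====

-- B rewrites A's tail recursion as an iterative binary-search loop with a merged cost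
-- block (objective: alternative decomposition, same asymptotic cost).

-- ===== PORT A =====
-- A's recursion is given fuel (b-a).toNat to make it total in Lean; under Pre_solve the
-- interval [a,b] shrinks by at least one each call, so the fuel is never exhausted.
-- 'int((a+b)/2)' is ported as Int.tdiv (a+b) 2: float division by 2 is exact for
-- |a+b| ≤ 2^32 and int() truncates toward zero, which is exactly Int.tdiv.
def solveFuelA (fuel : Nat) (a : Int) (b : Int) (n : Int) (hi_sum : List Int) (c : Int) (e : Int) (m : Int) (height : Int) : Int :=
  if a = b then
    let count_ups : Int := if a > 0 then a * height - (PySem.List.pyGetD hi_sum (a - 1) 0) else 0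
    let count_downs : Int :=
      if a > 0 then (PySem.List.pyGetD hi_sum (n - 1) 0 - PySem.List.pyGetD hi_sum (a - 1) 0) - (n - a) * height
      else PySem.List.pyGetD hi_sum (n - 1) 0 - (n - a) * height
    if count_ups = count_downs ∧ m ≤ c + e then count_ups * m
    else if count_ups < count_downs ∧ m ≤ c + e then count_ups * m + (count_downs - count_ups) * e
    else if count_ups > count_downs ∧ m ≤ c + e then count_downs * m + (count_ups - count_downs) * c
    else count_ups * c + count_downs * e
  else
    match fuel with
    | 0 => 0  -- fuel exhausted (unreachable under Pre_solve)
    | fuel' + 1 =>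
      let mid : Int := Int.tdiv (a + b) 2
      let current_height : Int :=
        if mid > 0 then PySem.List.pyGetD hi_sum mid 0 - PySem.List.pyGetD hi_sum (mid - 1) 0
        else PySem.List.pyGetD hi_sum mid 0
      if current_height < height then solveFuelA fuel' (mid + 1) b n hi_sum c e m height
      else solveFuelA fuel' a mid n hi_sum c e m height

def solve (a : Int) (b : Int) (n : Int) (hi_sum : List Int) (c : Int) (e : Int) (m : Int) (height : Int) : Int :=
  solveFuelA (b - a).toNat a b n hi_sum c e m height

-- ===== PORT B =====
-- B's merged cost computation at the settled index a.
def costB (a : Int) (n : Int) (hi_sum : List Int) (c : Int) (e : Int) (m : Int) (height : Int) : Int :=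
  let pref : Int := if a > 0 then PySem.List.pyGetD hi_sum (a - 1) 0 else 0
  let ups : Int := if a > 0 then a * height - pref else 0
  let downs : Int := (PySem.List.pyGetD hi_sum (n - 1) 0 - pref) - (n - a) * height
  if m ≤ c + e then
    if ups ≤ downs then ups * m + (downs - ups) * e
    else downs * m + (ups - downs) * c
  else ups * c + downs * e

-- B's while-loop over the shrinking window; fuel makes it total (never exhausted under Pre_solve).
def loopB (fuel : Nat) (a : Int) (b : Int) (n : Int) (hi_sum : List Int) (c : Int) (e : Int) (m : Int) (height : Int) : Int :=
  match fuel with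
  | 0 => costB a n hi_sum c e m height
  | fuel' + 1 =>
    if a = b then costB a n hi_sum c e m height
    else
      let mid : Int := PySem.Int.floordiv (a + b) 2
      let cur : Int := PySem.List.pyGetD hi_sum mid 0 - (if mid > 0 then PySem.List.pyGetD hi_sum (mid - 1) 0 else 0)
      if cur < height then loopB fuel' (mid + 1) b n hi_sum c e m height
      else loopB fuel' a mid n hi_sum c e m height

def solve_alt (a : Int) (b : Int) (n : Int) (hi_sum : List Int) (c : Int) (e : Int) (m : Int) (height : Int) : Int :=
  loopB ((b - a).toNat + 1) a b n hi_sum c e m height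

-- ===== PRECONDITION & SPEC =====
-- Pre_ admits inputs with n-1 a valid (possibly negative, Python-wrapping) index and search
-- bounds that are either already settled (a = b, with a-1 in range when a > 0) or a proper
-- window 0 <= a <= b <= len(hi_sum).  It excludes (a) inputs on which A raises (IndexError /
-- unbounded recursion) and (b) searches whose bounds leave [0, len] (negative a, a > b,
-- oversized b), where whether A returns at all, and its value, are accidents of Python's
-- negative-index wraparound that no caller of this binary search relies on.
def Pre_solve (a : Int) (b : Int) (n : Int) (hi_sum : List Int) (c : Int) (e : Int) (m : Int) (height : Int) : Prop :=
  PySem.Raise.InRange hi_sum.length (n - 1) ∧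
    ((a = b ∧ ¬(0 < a ∧ (hi_sum.length : Int) ≤ a - 1)) ∨
     (0 ≤ a ∧ a ≤ b ∧ b ≤ (hi_sum.length : Int)))
instance (a : Int) (b : Int) (n : Int) (hi_sum : List Int) (c : Int) (e : Int) (m : Int) (height : Int) : Decidable (Pre_solve a b n hi_sum c e m height) := by unfold Pre_solve; infer_instance

def pvWitness_solve : Int × Int × Int × List Int × Int × Int × Int × Int := (0, 2, 3, [1, 3, 6], 2, 1, 2, 2)

def Spec_solve (a : Int) (b : Int) (n : Int) (hi_sum : List Int) (c : Int) (e : Int) (m : Int) (height : Int) (out : Int) : Prop := out = solve_alt a b n hi_sum c e m height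
instance (a : Int) (b : Int) (n : Int) (hi_sum : List Int) (c : Int) (e : Int) (m : Int) (height : Int) (out : Int) : Decidable (Spec_solve a b n hi_sum c e m height out) := by unfold Spec_solve; infer_instance

-- ===== CLAIM (what is proved, stated in full; the proofs are below) =====
def Claim_equal_solve : Prop := ∀ (a : Int) (b : Int) (n : Int) (hi_sum : List Int) (c : Int) (e : Int) (m : Int) (height : Int), Dom_solve a b n hi_sum c e m height → Pre_solve a b n hi_sum c e m height → Spec_solve a b n hi_sum c e m height (solve a b n hi_sum c e m height)

-- ===== LEMMAS AND PROOFS =====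

-- A's four-way branch on (ups, downs) equals B's merged three-way branch.
lemma mergeCost (u d c e m : Int) :
    (if u = d ∧ m ≤ c + e then u * m
     else if u < d ∧ m ≤ c + e then u * m + (d - u) * e
     else if u > d ∧ m ≤ c + e then d * m + (u - d) * c
     else u * c + d * e)
    = (if m ≤ c + e then (if u ≤ d then u * m + (d - u) * e else d * m + (u - d) * c)
       else u * c + d * e) := by
  by_cases hm : m ≤ c + e
  · rcases lt_trichotomy u d with h | h | h
    · rw [if_neg (by omega : ¬(u = d ∧ m ≤ c + e)), if_pos ⟨h, hm⟩, if_pos hm,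
        if_pos (le_of_lt h)]
    · subst h
      rw [if_pos ⟨rfl, hm⟩, if_pos hm, if_pos le_rfl]; ring
    · rw [if_neg (by omega : ¬(u = d ∧ m ≤ c + e)),
        if_neg (by omega : ¬(u < d ∧ m ≤ c + e)), if_pos ⟨h, hm⟩, if_pos hm,
        if_neg (by omega : ¬(u ≤ d))]
  · rw [if_neg (fun h => hm h.2), if_neg (fun h => hm h.2), if_neg (fun h => hm h.2),
      if_neg hm]

-- A's terminal block equals B's cost helper.
lemma blockA_eq_costB (a n : Int) (hi_sum : List Int) (c e m height : Int) :
    (let count_ups : Int := if a > 0 then a * height - (PySem.List.pyGetD hi_sum (a - 1) 0) else 0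
     let count_downs : Int :=
       if a > 0 then (PySem.List.pyGetD hi_sum (n - 1) 0 - PySem.List.pyGetD hi_sum (a - 1) 0) - (n - a) * height
       else PySem.List.pyGetD hi_sum (n - 1) 0 - (n - a) * height
     if count_ups = count_downs ∧ m ≤ c + e then count_ups * m
     else if count_ups < count_downs ∧ m ≤ c + e then count_ups * m + (count_downs - count_ups) * e
     else if count_ups > count_downs ∧ m ≤ c + e then count_downs * m + (count_ups - count_downs) * c
     else count_ups * c + count_downs * e) = costB a n hi_sum c e m height := by
  unfold costB
  by_cases hpos : a > 0
  · simp only [if_pos hpos]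
    exact mergeCost _ _ c e m
  · simp only [if_neg hpos]
    have h2 : PySem.List.pyGetD hi_sum (n - 1) 0 - 0 = PySem.List.pyGetD hi_sum (n - 1) 0 :=
      sub_zero _
    rw [h2]
    exact mergeCost 0 _ c e m

-- core equivalence, by induction on B's fuel
lemma loop_eq (fb : Nat) : ∀ (fa : Nat) (a b : Int) (n : Int) (hi_sum : List Int) (c e m height : Int),
    0 ≤ a → a ≤ b → (b - a).toNat ≤ fa → (b - a).toNat < fb →
    solveFuelA fa a b n hi_sum c e m height = loopB fb a b n hi_sum c e m height := by
  induction fb with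
  | zero => intro _ _ _ _ _ _ _ _ _ _ _ _ h; omega
  | succ fb ih =>
    intro fa a b n hi_sum c e m height ha hab hfa _
    by_cases heq : a = b
    · subst heq
      rw [loopB]
      rw [if_pos rfl]
      rw [solveFuelA.eq_def]
      rw [if_pos rfl]
      exact blockA_eq_costB a n hi_sum c e m height
    · have hab' : a < b := lt_of_le_of_ne hab heq
      obtain ⟨fa', rfl⟩ : ∃ fa', fa = fa' + 1 := ⟨fa - 1, by omega⟩
      rw [solveFuelA.eq_def, loopB]
      simp only [if_neg heq]
      have hmid : Int.tdiv (a + b) 2 = PySem.Int.floordiv (a + b) 2 := by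
        rw [PySem.Int.floordiv_eq_ediv_of_pos (by omega)]
        exact Int.tdiv_eq_ediv_of_nonneg (by omega)
      have hmid' : PySem.Int.floordiv (a + b) 2 = (a + b) / 2 := PySem.Int.floordiv_eq_ediv_of_pos (by omega)
      rw [hmid, hmid']
      have hcur : (if (a + b) / 2 > 0 then
            PySem.List.pyGetD hi_sum ((a + b) / 2) 0 - PySem.List.pyGetD hi_sum ((a + b) / 2 - 1) 0
          else PySem.List.pyGetD hi_sum ((a + b) / 2) 0) =
          PySem.List.pyGetD hi_sum ((a + b) / 2) 0 -
            (if (a + b) / 2 > 0 then PySem.List.pyGetD hi_sum ((a + b) / 2 - 1) 0 else 0) := by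
        split_ifs <;> ring
      rw [hcur]
      by_cases hc : PySem.List.pyGetD hi_sum ((a + b) / 2) 0 -
          (if (a + b) / 2 > 0 then PySem.List.pyGetD hi_sum ((a + b) / 2 - 1) 0 else 0) < height
      · rw [if_pos hc, if_pos hc]
        exact ih fa' ((a + b) / 2 + 1) b n hi_sum c e m height (by omega) (by omega) (by omega) (by omega)
      · rw [if_neg hc, if_neg hc]
        exact ih fa' a ((a + b) / 2) n hi_sum c e m height ha (by omega) (by omega) (by omega)

-- ===== VERDICT (by name: the statement is the Claim_ definition above) =====
theorem solve_spec : Claim_equal_solve := by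
  intro a b n hi_sum c e m height _ hpre
  unfold Spec_solve solve solve_alt
  rcases hpre with ⟨-, hset | ⟨ha, hab, -⟩⟩
  · obtain ⟨rfl, -⟩ := hset
    simp only [sub_self, Int.toNat_zero]
    rw [loopB, if_pos rfl, solveFuelA.eq_def, if_pos rfl]
    exact blockA_eq_costB a n hi_sum c e m height
  · exact loop_eq ((b - a).toNat + 1) ((b - a).toNat) a b n hi_sum c e m height ha hab (le_refl _) (by omega)
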